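-- pv_equiv track=rewrite | github.com/mbush-1/string-evaluator | string-evaluator.py | split_expression
-- ===== SOURCE A (Python) =====
-- def split_expression(symbol, token_list):  # Takes token list, and splits in accordance with given symbol.
--     before, inside, after = [], [], []
--     symbol_appears = False
--     for token in token_list:
--         if token == symbol and not symbol_appears:
--             symbol_appears = True
--         elif not symbol_appears:
--             before.append(token)
--         elif symbol_appears:
--             after.append(token)
--
--     inside.append(before[-1])
--     before.pop(-1)
--
--     inside.append(symbol)
--
--     inside.append(after[0])
--     after.pop(0)
--
--     return before, inside, after  # '1 + 2 * 3' --> [1 +], [2 * 3], []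
-- ===== SOURCE B (Python) =====
-- def split_expression(symbol, token_list):  # Takes token list, and splits in accordance with given symbol.
--     idx = token_list.index(symbol)
--     before = token_list[:idx]
--     after = token_list[idx + 1:]
--     inside = [before[-1], symbol, after[0]]
--     return before[:-1], inside, after[1:]
-- ===== Notes on version B (the rewrite author's own statement) =====
-- stated objective: simpler
-- what changed: Replaces A's flag-driven per-token append loop with one index lookup plus three slices around the first occurrence of the symbol; Pre_ excludes inputs where both programs raise (symbol absent, or at the first/last position of the list, or the list empty).
import Mathlib
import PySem

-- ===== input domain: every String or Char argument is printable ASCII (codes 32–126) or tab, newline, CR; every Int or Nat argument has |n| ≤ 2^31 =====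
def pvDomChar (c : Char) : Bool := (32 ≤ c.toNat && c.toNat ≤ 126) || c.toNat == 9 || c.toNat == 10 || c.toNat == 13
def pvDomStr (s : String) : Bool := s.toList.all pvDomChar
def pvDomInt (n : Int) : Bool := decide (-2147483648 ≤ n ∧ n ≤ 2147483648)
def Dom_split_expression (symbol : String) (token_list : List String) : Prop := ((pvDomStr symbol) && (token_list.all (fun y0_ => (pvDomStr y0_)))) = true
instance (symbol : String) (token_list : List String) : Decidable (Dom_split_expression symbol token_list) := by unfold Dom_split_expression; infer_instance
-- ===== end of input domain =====

-- B replaces A's flag-driven per-token append loop with one index lookup plus slicing (objective: simpler).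

-- ===== PORT A =====
-- the loop body of A, folded over token_list with state (before, after, symbol_appears)
def splitStep (symbol : String) (st : List String × List String × Bool) (token : String) :
    List String × List String × Bool :=
  if token == symbol && !st.2.2 then (st.1, st.2.1, true)
  else if !st.2.2 then (st.1 ++ [token], st.2.1, st.2.2)
  else (st.1, st.2.1 ++ [token], st.2.2)

def split_expression (symbol : String) (token_list : List String) : List String × List String × List String :=
  let st := token_list.foldl (splitStep symbol) ([], [], false)
  let before := st.1
  let after := st.2.1
  -- before[-1] and after[0] raise IndexError when missing; Pre_ excludes that, default is junk
  match PySem.List.pyGet? before (-1), PySem.List.pyGet? after 0 with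
  | some last, some first => (before.dropLast, [last, symbol, first], after.tail)
  | _, _ => ([], [], [])

-- ===== PORT B =====
def split_expression_alt (symbol : String) (token_list : List String) : List String × List String × List String :=
  match PySem.List.index? token_list symbol with
  | none => ([], [], [])  -- token_list.index raises ValueError; Pre_ excludes this
  | some idx =>
    let before := PySem.List.slice token_list none (some (idx : Int))
    let after := PySem.List.slice token_list (some ((idx : Int) + 1)) none
    match PySem.List.pyGet? before (-1) with
    | none => ([], [], [])  -- IndexError; Pre_ excludes this
    | some last =>
      match PySem.List.pyGet? after 0 with
      | none => ([], [], [])  -- IndexError; Pre_ excludes this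
      | some first =>
          (PySem.List.slice before none (some (-1)), [last, symbol, first],
           PySem.List.slice after (some 1) none)

-- ===== PRECONDITION & SPEC =====
-- Pre_ excludes exactly the inputs on which both programs raise: symbol absent
-- (A: IndexError on after[0]; B: ValueError from .index), symbol first (before[-1]
-- on empty before) or first occurrence last (after[0] on empty after).
def Pre_split_expression (symbol : String) (token_list : List String) : Prop :=
  ((PySem.List.index? token_list symbol).any
     (fun i => decide (1 ≤ i ∧ i + 1 < token_list.length))) = true
instance (symbol : String) (token_list : List String) : Decidable (Pre_split_expression symbol token_list) := by unfold Pre_split_expression; infer_instance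

def pvWitness_split_expression : String × List String := ("+", ["1", "+", "2", "*", "3"])

def Spec_split_expression (symbol : String) (token_list : List String) (out : List String × List String × List String) : Prop := out = split_expression_alt symbol token_list
instance (symbol : String) (token_list : List String) (out : List String × List String × List String) : Decidable (Spec_split_expression symbol token_list out) := by unfold Spec_split_expression; infer_instance

-- ===== CLAIM (what is proved, stated in full; the proofs are below) =====
def Claim_equal_split_expression : Prop := ∀ (symbol : String) (token_list : List String), Dom_split_expression symbol token_list → Pre_split_expression symbol token_list → Spec_split_expression symbol token_list (split_expression symbol token_list)

-- ===== LEMMAS AND PROOFS =====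

-- A's loop over tokens before the symbol appends them all to `before`
theorem splitStep_no_symbol (symbol : String) (pre : List String) (h : symbol ∉ pre)
    (b a : List String) :
    pre.foldl (splitStep symbol) (b, a, false) = (b ++ pre, a, false) := by
  induction pre generalizing b with
  | nil => simp
  | cons x xs ih =>
      have hx : x ≠ symbol := by rintro rfl; exact h (List.mem_cons_self)
      have hxs : symbol ∉ xs := fun hm => h (List.mem_cons_of_mem _ hm)
      simp [List.foldl_cons, splitStep, hx, ih hxs]

-- after the flag is set, every token goes to `after`
theorem splitStep_after (symbol : String) (suf : List String) (b a : List String) :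
    suf.foldl (splitStep symbol) (b, a, true) = (b, a ++ suf, true) := by
  induction suf generalizing a with
  | nil => simp
  | cons x xs ih => simp [List.foldl_cons, splitStep, ih]

-- ===== VERDICT (by name: the statement is the Claim_ definition above) =====
theorem split_expression_spec : Claim_equal_split_expression := by
  intro symbol token_list _ hpre
  unfold Pre_split_expression at hpre
  unfold Spec_split_expression
  rcases hi : PySem.List.index? token_list symbol with _ | i
  · rw [hi] at hpre; exact absurd hpre (by simp)
  · rw [hi] at hpre
    simp only [Option.any_some] at hpre
    obtain ⟨hlb, hub⟩ := of_decide_eq_true hpre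
    obtain ⟨pre, suf, hsplit, hlen, hnotmem⟩ :=
      (PySem.List.index?_eq_some_iff token_list symbol i).mp hi
    subst hsplit
    -- A's fold: pre goes to before, symbol flips the flag, suf goes to after
    have hfold : (pre ++ symbol :: suf).foldl (splitStep symbol) ([], [], false)
        = (pre, suf, true) := by
      rw [List.foldl_append, splitStep_no_symbol symbol pre hnotmem]
      simp [List.foldl_cons, splitStep, splitStep_after]
    -- B's slices give the same pre / suf
    have hbefore : PySem.List.slice (pre ++ symbol :: suf) none (some ((i : Nat) : Int)) = pre := by
      rw [PySem.List.slice_to_natCast, ← hlen, List.take_left]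
    have hafter : PySem.List.slice (pre ++ symbol :: suf)
        (some (((i : Nat) : Int) + 1)) none = suf := by
      have : (((i : Nat) : Int) + 1) = (((i + 1 : Nat) : Int)) := by push_cast; ring
      rw [this, PySem.List.slice_from_natCast, ← hlen]
      simp
    unfold split_expression split_expression_alt
    rw [hfold, hi]
    simp only [hbefore, hafter]
    -- both sides now index into pre / suf; Pre_ makes both lookups succeed
    have hpre_ne : pre ≠ [] := by
      intro h; subst h; simp at hlen; omega
    have hsuf_ne : suf ≠ [] := by
      intro h; subst h
      simp [← hlen] at hub
    rcases List.exists_cons_of_ne_nil hsuf_ne with ⟨y, ys, rfl⟩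
    simp [PySem.List.pyGet?_neg_one,       List.getLast?_eq_some_iff.mpr ⟨pre.dropLast, (List.dropLast_concat_getLast hpre_ne).symm⟩,
      PySem.List.slice_to_neg_one, PySem.List.slice_from_one]
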